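-- pv_equiv track=rewrite | github.com/zs-fekete/circRNA_script_collection | Script/Circstar_readcounts.py | summarize_circstar_outs
-- ===== SOURCE A (Python) =====
-- import collections
--
-- def summarize_circstar_outs(cirdic_list):
--     """Make a dictionary of all circs and read counts"""
--
--     #Make a set of all circRNA IDs
--     circid_list = [list(cirdic.keys()) for cirdic in cirdic_list]
--     circid_set = set([item for sublist in circid_list for item in sublist])
--
--     circ_counts = collections.defaultdict(lambda: [])
--     #Check the occurrence of each circRNA ID in each sample and add read counts to list
--     for circid in circid_set:
--         for dic in cirdic_list:
--             if circid in dic.keys():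
--                 #append only total read counts, not all info
--                 circ_counts[circid].append(dic[circid][0])
--             else:
--                 circ_counts[circid].append(0)
--
--     return circ_counts
-- ===== SOURCE B (Python) =====
-- import collections
--
-- def summarize_circstar_outs(cirdic_list):
--     """Make a dictionary of all circs and read counts (single scatter pass)"""
--     n = len(cirdic_list)
--     circ_counts = collections.defaultdict(list)
--     # One pass over the samples: scatter each present count into a
--     # preallocated zero row at its sample's column.
--     for i, dic in enumerate(cirdic_list):
--         for circid, info in dic.items():
--             if circid not in circ_counts:
--                 circ_counts[circid] = [0] * n
--             circ_counts[circid][i] = info[0]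
--     return circ_counts
-- ===== Notes on version B (the rewrite author's own statement) =====
-- stated objective: faster
-- what changed: Instead of building a set of all IDs and then, per ID, re-scanning every sample dict with a membership test, B makes one pass over the samples and scatters each present count into a preallocated zero row at that sample's column; the per-ID inner scan and the set construction disappear.
import Mathlib
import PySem

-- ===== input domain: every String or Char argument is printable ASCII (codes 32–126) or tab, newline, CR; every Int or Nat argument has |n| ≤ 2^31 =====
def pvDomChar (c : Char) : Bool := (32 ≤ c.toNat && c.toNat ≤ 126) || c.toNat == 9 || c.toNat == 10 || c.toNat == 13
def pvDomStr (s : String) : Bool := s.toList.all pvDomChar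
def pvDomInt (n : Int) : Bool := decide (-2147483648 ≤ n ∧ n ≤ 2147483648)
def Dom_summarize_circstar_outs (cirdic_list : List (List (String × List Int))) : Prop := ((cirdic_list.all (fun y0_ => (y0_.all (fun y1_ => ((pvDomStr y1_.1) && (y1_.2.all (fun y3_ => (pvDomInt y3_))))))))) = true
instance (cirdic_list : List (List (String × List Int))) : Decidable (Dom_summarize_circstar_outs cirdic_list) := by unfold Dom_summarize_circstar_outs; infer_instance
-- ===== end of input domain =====

-- B replaces A's per-ID rescans of every sample dict by one scatter pass that
-- preallocates a zero row per new ID and writes each present count into its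
-- sample's column; equal return value proved on Pre_.


-- ===== PORT A =====
-- each inner 'List (String × List Int)' encodes one Python dict (association list);
-- 'dic[circid][0]' is ported as '.headD 0', exact because Pre_ demands nonempty values.
def summarize_circstar_outs (cirdic_list : List (List (String × List Int))) : List (String × List Int) :=
  let circid_list := cirdic_list.map (fun cirdic => (PySem.Dict.mk cirdic).keys)
  let circid_set := PySem.Set.ofList (circid_list.flatMap id)
  let circ_counts := circid_set.foldl (fun cc circid =>
    cirdic_list.foldl (fun cc dic =>
      if (PySem.Dict.mk dic).contains circid then
        -- circ_counts[circid].append(dic[circid][0])   (defaultdict(list))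
        cc.insert circid (cc.getD circid [] ++ [((PySem.Dict.mk dic).getD circid []).headD 0])
      else
        cc.insert circid (cc.getD circid [] ++ [(0 : Int)])) cc)
    PySem.Dict.empty
  circ_counts.items

-- ===== PORT B =====
-- 'circ_counts[circid][i] = info[0]' is ported with pySetD (exact: 0 ≤ i < n) and
-- '.headD 0', exact because Pre_ demands nonempty values.
def summarize_circstar_outs_alt (cirdic_list : List (List (String × List Int))) : List (String × List Int) :=
  let n := cirdic_list.length
  let circ_counts := (PySem.List.enumerate cirdic_list 0).foldl (fun cc p =>
    p.2.foldl (fun cc kv =>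
      let cc := if cc.contains kv.1 then cc else cc.insert kv.1 (List.replicate n (0 : Int))
      cc.insert kv.1 (PySem.List.pySetD (cc.getD kv.1 []) p.1 (kv.2.headD 0))) cc)
    PySem.Dict.empty
  circ_counts.items

-- ===== PRECONDITION & SPEC =====
-- Pre_ excludes (a) inputs with an empty value list, on which A raises IndexError at
-- dic[circid][0], and (b) inner lists with duplicate keys, which do not encode any
-- Python dict (the argument is a dict in Python, so A can never receive them).
def Pre_summarize_circstar_outs (cirdic_list : List (List (String × List Int))) : Prop :=
  ∀ dic ∈ cirdic_list, (dic.map (·.1)).Nodup ∧ ∀ kv ∈ dic, kv.2 ≠ []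
instance (cirdic_list : List (List (String × List Int))) : Decidable (Pre_summarize_circstar_outs cirdic_list) := by unfold Pre_summarize_circstar_outs; infer_instance
def pvWitness_summarize_circstar_outs : (List (List (String × List Int))) :=
  [[("chr1:10|200", [3, 1]), ("chr2:5|90", [2])], [("chr2:5|90", [7, 0])]]
def Spec_summarize_circstar_outs (cirdic_list : List (List (String × List Int))) (out : List (String × List Int)) : Prop := out = summarize_circstar_outs_alt cirdic_list
instance (cirdic_list : List (List (String × List Int))) (out : List (String × List Int)) : Decidable (Spec_summarize_circstar_outs cirdic_list out) := by unfold Spec_summarize_circstar_outs; infer_instance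

-- ===== CLAIM (what is proved, stated in full; the proofs are below) =====
def Claim_equal_summarize_circstar_outs : Prop := ∀ (cirdic_list : List (List (String × List Int))), Dom_summarize_circstar_outs cirdic_list → Pre_summarize_circstar_outs cirdic_list → Spec_summarize_circstar_outs cirdic_list (summarize_circstar_outs cirdic_list)

-- ===== LEMMAS AND PROOFS =====

def pvG (dic : List (String × List Int)) (c : String) : Int :=
  if (PySem.Dict.mk dic).contains c then ((PySem.Dict.mk dic).getD c []).headD 0 else 0

def pvRow (l : List (List (String × List Int))) (c : String) : List Int :=
  l.map (fun dic => pvG dic c)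

-- A's inner body collapses: both branches append pvG to the row of c
theorem pvA_body (cc : PySem.Dict String (List Int)) (dic : List (String × List Int)) (c : String) :
    (if (PySem.Dict.mk dic).contains c then
        cc.insert c (cc.getD c [] ++ [((PySem.Dict.mk dic).getD c []).headD 0])
      else cc.insert c (cc.getD c [] ++ [(0 : Int)]))
    = cc.insert c (cc.getD c [] ++ [pvG dic c]) := by
  by_cases h : (PySem.Dict.mk dic).contains c = true <;> simp [pvG, h]

theorem pvA_getD_append (pre : List (String × List Int)) (c : String) (r : List Int)
    (h : c ∉ pre.map (·.1)) : (PySem.Dict.mk (pre ++ [(c, r)])).getD c [] = r := by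
  induction pre with
  | nil => simp [PySem.Dict.getD_eq_get?_getD, PySem.Dict.get?_mk_cons]
  | cons p pre ih =>
    obtain ⟨k, v⟩ := p
    simp only [List.map_cons, List.mem_cons, not_or] at h
    simp only [List.cons_append, PySem.Dict.getD_eq_get?_getD, PySem.Dict.get?_mk_cons] at ih ⊢
    rw [if_neg (by simp [Ne.symm h.1])]
    exact ih h.2

theorem pvA_insert_append (pre : List (String × List Int)) (c : String) (r v : List Int)
    (h : c ∉ pre.map (·.1)) :
    (PySem.Dict.mk (pre ++ [(c, r)])).insert c v = PySem.Dict.mk (pre ++ [(c, v)]) := by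
  have hcon : (PySem.Dict.mk (pre ++ [(c, r)])).contains c = true := by
    simp [PySem.Dict.contains_mk]
  apply PySem.Dict.ext
  rw [PySem.Dict.items_insert_of_contains _ _ hcon]
  show List.map _ (pre ++ [(c, r)]) = pre ++ [(c, v)]
  rw [List.map_append]
  congr 1
  · conv_rhs => rw [← List.map_id pre]
    apply List.map_congr_left
    intro p hp
    have : p.1 ≠ c := by
      intro hc; exact h (by simpa [hc] using List.mem_map_of_mem (f := (·.1)) hp)
    simp [this]
  · simp

theorem pvA_inner2 (lst : List (List (String × List Int))) (c : String) (pre : List (String × List Int))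
    (h : c ∉ pre.map (·.1)) : ∀ (r : List Int),
    lst.foldl (fun cc dic => cc.insert c (cc.getD c [] ++ [pvG dic c])) (PySem.Dict.mk (pre ++ [(c, r)]))
      = PySem.Dict.mk (pre ++ [(c, r ++ pvRow lst c)]) := by
  induction lst with
  | nil => intro r; simp [pvRow]
  | cons d lst ih =>
    intro r
    rw [List.foldl_cons, pvA_getD_append pre c r h, pvA_insert_append pre c r _ h, ih (r ++ [pvG d c])]
    simp [pvRow]

theorem pvA_inner (d : List (String × List Int)) (lst' : List (List (String × List Int))) (c : String)
    (cc : PySem.Dict String (List Int)) (h : cc.contains c = false) :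
    (d :: lst').foldl (fun cc dic => cc.insert c (cc.getD c [] ++ [pvG dic c])) cc
      = PySem.Dict.mk (cc.items ++ [(c, pvRow (d :: lst') c)]) := by
  have hk : c ∉ cc.items.map (·.1) := by
    rw [PySem.Dict.contains_eq_decide_mem_keys] at h
    simpa [PySem.Dict.keys] using h
  rw [List.foldl_cons, PySem.Dict.getD_of_not_contains _ _ h]
  have hins : cc.insert c ([] ++ [pvG d c]) = PySem.Dict.mk (cc.items ++ [(c, [pvG d c])]) := by
    apply PySem.Dict.ext
    rw [PySem.Dict.items_insert_of_not_contains _ _ h]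
    rfl
  rw [hins, pvA_inner2 lst' c cc.items hk [pvG d c]]
  simp [pvRow]

theorem pvA_outer (d0 : List (String × List Int)) (lst' : List (List (String × List Int))) :
    ∀ (S : List String) (cc : PySem.Dict String (List Int)), S.Nodup →
    (∀ c ∈ S, cc.contains c = false) →
    (S.foldl (fun cc c => (d0 :: lst').foldl (fun cc dic => cc.insert c (cc.getD c [] ++ [pvG dic c])) cc) cc).items
      = cc.items ++ S.map (fun c => (c, pvRow (d0 :: lst') c)) := by
  intro S
  induction S with
  | nil => intro cc _ _; simp
  | cons c S ih =>
    intro cc hnd hfresh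
    rw [List.foldl_cons, pvA_inner d0 lst' c cc (hfresh c (by simp))]
    rw [ih _ (List.nodup_cons.mp hnd).2 ?_]
    · simp
    · intro c' hc'
      have h1 : cc.contains c' = false := hfresh c' (by simp [hc'])
      have h2 : c' ≠ c := fun he => (List.nodup_cons.mp hnd).1 (he ▸ hc')
      rw [PySem.Dict.contains_eq_decide_mem_keys] at h1 ⊢
      simp only [PySem.Dict.keys] at h1 ⊢
      simp only [List.map_append, List.mem_append] at *
      simp_all

-- B's inner body: the conditional preallocation plus the element write collapse to one insert
theorem pvB_body (n : Nat) (i : Int) (cc : PySem.Dict String (List Int)) (kv : String × List Int) :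
    (let cc' := if cc.contains kv.1 then cc else cc.insert kv.1 (List.replicate n (0 : Int))
     cc'.insert kv.1 (PySem.List.pySetD (cc'.getD kv.1 []) i (kv.2.headD 0)))
    = cc.insert kv.1 (PySem.List.pySetD (if cc.contains kv.1 then cc.getD kv.1 [] else List.replicate n 0) i (kv.2.headD 0)) := by
  by_cases h : cc.contains kv.1 = true <;>
    simp [h, PySem.Dict.getD_insert_self, PySem.Dict.insert_insert_self]

theorem pvB_pres (n : Nat) (i : Int) :
    ∀ (pairs : List (String × List Int)) (cc : PySem.Dict String (List Int)) (c : String),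
    c ∉ pairs.map (·.1) →
    (pairs.foldl (fun cc kv => cc.insert kv.1 (PySem.List.pySetD (if cc.contains kv.1 then cc.getD kv.1 [] else List.replicate n 0) i (kv.2.headD 0))) cc).contains c = cc.contains c ∧
    (pairs.foldl (fun cc kv => cc.insert kv.1 (PySem.List.pySetD (if cc.contains kv.1 then cc.getD kv.1 [] else List.replicate n 0) i (kv.2.headD 0))) cc).getD c [] = cc.getD c [] := by
  intro pairs
  induction pairs with
  | nil => intro cc c _; exact ⟨rfl, rfl⟩
  | cons kv rest ih =>
    intro cc c h
    simp only [List.map_cons, List.mem_cons, not_or] at h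
    rw [List.foldl_cons]
    obtain ⟨h1, h2⟩ := ih _ c h.2
    refine ⟨?_, ?_⟩
    · rw [h1, PySem.Dict.contains_insert]; simp [h.1]
    · rw [h2, PySem.Dict.getD_insert]; simp [h.1]

theorem pvB_inner (n : Nat) (i : Int) :
    ∀ (pairs : List (String × List Int)) (cc : PySem.Dict String (List Int)) (c : String),
    (pairs.map (·.1)).Nodup →
    (pairs.foldl (fun cc kv => cc.insert kv.1 (PySem.List.pySetD (if cc.contains kv.1 then cc.getD kv.1 [] else List.replicate n 0) i (kv.2.headD 0))) cc).contains c
      = ((PySem.Dict.mk pairs).contains c || cc.contains c) ∧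
    (pairs.foldl (fun cc kv => cc.insert kv.1 (PySem.List.pySetD (if cc.contains kv.1 then cc.getD kv.1 [] else List.replicate n 0) i (kv.2.headD 0))) cc).getD c []
      = if (PySem.Dict.mk pairs).contains c then
          PySem.List.pySetD (if cc.contains c then cc.getD c [] else List.replicate n 0) i (((PySem.Dict.mk pairs).getD c []).headD 0)
        else cc.getD c [] := by
  intro pairs
  induction pairs with
  | nil =>
    intro cc c _
    constructor
    · simp [PySem.Dict.contains_mk]
    · simp [PySem.Dict.contains_mk]
  | cons kv rest ih =>
    intro cc c hnd
    obtain ⟨k, v⟩ := kv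
    simp only [List.map_cons, List.nodup_cons] at hnd
    rw [List.foldl_cons]
    by_cases hc : k = c
    · subst hc
      have hrest : k ∉ rest.map (·.1) := hnd.1
      obtain ⟨h1, h2⟩ := pvB_pres n i rest _ k hrest
      have hmk : (PySem.Dict.mk ((k, v) :: rest)).contains k = true := by
        simp [PySem.Dict.contains_mk]
      have hmkget : (PySem.Dict.mk ((k, v) :: rest)).getD k [] = v := by
        simp [PySem.Dict.getD_eq_get?_getD, PySem.Dict.get?_mk_cons]
      refine ⟨?_, ?_⟩
      · rw [h1, hmk, PySem.Dict.contains_insert]; simp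
      · rw [h2, hmk, hmkget, PySem.Dict.getD_insert_self]; simp
    · have hc' : c ≠ k := fun h => hc h.symm
      have hcc1 : (cc.insert k (PySem.List.pySetD (if cc.contains k then cc.getD k [] else List.replicate n 0) i (v.headD 0))).contains c = cc.contains c := by
        rw [PySem.Dict.contains_insert]; simp [hc']
      have hcc2 : (cc.insert k (PySem.List.pySetD (if cc.contains k then cc.getD k [] else List.replicate n 0) i (v.headD 0))).getD c [] = cc.getD c [] := by
        rw [PySem.Dict.getD_insert]; simp [hc']
      obtain ⟨h1, h2⟩ := ih (cc.insert k (PySem.List.pySetD (if cc.contains k then cc.getD k [] else List.replicate n 0) i (v.headD 0))) c hnd.2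
      have hmkc : (PySem.Dict.mk ((k, v) :: rest)).contains c = (PySem.Dict.mk rest).contains c := by
        simp [PySem.Dict.contains_mk, hc]
      have hmkg : (PySem.Dict.mk ((k, v) :: rest)).getD c [] = (PySem.Dict.mk rest).getD c [] := by
        simp [PySem.Dict.getD_eq_get?_getD, PySem.Dict.get?_mk_cons, hc]
      refine ⟨?_, ?_⟩
      · rw [h1, hcc1, hmkc]
      · rw [h2, hcc1, hcc2, hmkc, hmkg]

theorem pvRowZero (pref : List (List (String × List Int))) (c : String)
    (h : ∀ dic ∈ pref, (PySem.Dict.mk dic).contains c = false) :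
    pref.map (fun dic => pvG dic c) = List.replicate pref.length 0 := by
  induction pref with
  | nil => rfl
  | cons d pref ih =>
    simp only [List.map_cons, List.length_cons, List.replicate_succ]
    rw [ih (fun dic hd => h dic (by simp [hd]))]
    simp [pvG, h d (by simp)]

theorem pvB_outer (l : List (List (String × List Int)))
    (hpre : ∀ dic ∈ l, (dic.map (·.1)).Nodup) :
    ∀ (suff pref : List (List (String × List Int))), l = pref ++ suff →
    ∀ (cc : PySem.Dict String (List Int)),
    (∀ c, cc.contains c = pref.any (fun dic => (PySem.Dict.mk dic).contains c)) →
    (∀ c, cc.getD c [] = if pref.any (fun dic => (PySem.Dict.mk dic).contains c) then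
        pref.map (fun dic => pvG dic c) ++ List.replicate (l.length - pref.length) 0 else []) →
    ∀ c,
    ((PySem.List.enumerate suff (pref.length : Int)).foldl
        (fun cc p => p.2.foldl (fun cc kv => cc.insert kv.1
          (PySem.List.pySetD (if cc.contains kv.1 then cc.getD kv.1 [] else List.replicate l.length 0) p.1 (kv.2.headD 0))) cc) cc).contains c
      = l.any (fun dic => (PySem.Dict.mk dic).contains c) ∧
    ((PySem.List.enumerate suff (pref.length : Int)).foldl
        (fun cc p => p.2.foldl (fun cc kv => cc.insert kv.1
          (PySem.List.pySetD (if cc.contains kv.1 then cc.getD kv.1 [] else List.replicate l.length 0) p.1 (kv.2.headD 0))) cc) cc).getD c []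
      = if l.any (fun dic => (PySem.Dict.mk dic).contains c) then pvRow l c else [] := by
  intro suff
  induction suff with
  | nil =>
    intro pref hl cc hcont hget c
    have hp : pref = l := by simpa using hl.symm
    subst hp
    rw [PySem.List.enumerate_nil, List.foldl_nil]
    refine ⟨hcont c, ?_⟩
    rw [hget c]
    simp [pvRow]
  | cons d suff ih =>
    intro pref hl cc hcont hget c
    have hdl : d ∈ l := by rw [hl]; simp
    have hnodd : (d.map (·.1)).Nodup := hpre d hdl
    have hj : l.length = pref.length + (suff.length + 1) := by
      rw [hl]; simp
    rw [PySem.List.enumerate_cons, List.foldl_cons]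
    have hcast : (pref.length : Int) + 1 = (((pref ++ [d]).length : Nat) : Int) := by simp
    rw [hcast]
    set cc1 := d.foldl (fun cc kv => cc.insert kv.1
      (PySem.List.pySetD (if cc.contains kv.1 then cc.getD kv.1 [] else List.replicate l.length 0) (pref.length : Int) (kv.2.headD 0))) cc with hcc1
    refine ih (pref ++ [d]) (by simp [hl]) cc1 ?_ ?_ c
    · intro c'
      obtain ⟨h1, _⟩ := pvB_inner l.length (pref.length : Int) d cc c' hnodd
      rw [hcc1, h1, hcont c']
      rw [List.any_append, List.any_cons, List.any_nil, Bool.or_false, Bool.or_comm]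
    · intro c'
      obtain ⟨_, h2⟩ := pvB_inner l.length (pref.length : Int) d cc c' hnodd
      rw [hcc1, h2]
      have hlen1 : l.length - pref.length = suff.length + 1 := by omega
      have hlen2 : l.length - (pref ++ [d]).length = suff.length := by simp; omega
      have hsetgen : ∀ v : Int, PySem.List.pySetD
          (pref.map (fun dic => pvG dic c') ++ List.replicate (suff.length + 1) 0)
          ((pref.length : Nat) : Int) v
          = pref.map (fun dic => pvG dic c') ++ (v :: List.replicate suff.length 0) := by
        intro v
        rw [PySem.List.pySetD_natCast, List.replicate_succ, List.set_append]
        have hlt : ¬ (pref.length < (pref.map (fun dic => pvG dic c')).length) := by simp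
        rw [if_neg hlt]
        simp
      by_cases hd : (PySem.Dict.mk d).contains c' = true
      · rw [if_pos hd, hcont c', hget c', hlen1]
        have hany : ((pref ++ [d]).any (fun dic => (PySem.Dict.mk dic).contains c')) = true :=
          List.any_eq_true.mpr ⟨d, by simp, hd⟩
        rw [hany, if_pos rfl, hlen2]
        have hgd : pvG d c' = ((PySem.Dict.mk d).getD c' []).headD 0 := by
          unfold pvG; rw [hd]; simp
        by_cases hP : (pref.any fun dic => (PySem.Dict.mk dic).contains c') = true
        · rw [if_pos hP, if_pos hP, hsetgen, List.map_append,
              List.append_assoc, List.map_singleton, List.singleton_append, ← hgd]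
        · rw [if_neg hP]
          have hall : ∀ dic ∈ pref, (PySem.Dict.mk dic).contains c' = false := by
            intro dic hdic
            by_contra hne
            simp only [Bool.not_eq_false] at hne
            exact hP (List.any_eq_true.mpr ⟨dic, hdic, hne⟩)
          have hrepl : List.replicate l.length (0 : Int)
              = pref.map (fun dic => pvG dic c') ++ List.replicate (suff.length + 1) 0 := by
            rw [pvRowZero pref c' hall, ← List.replicate_add, hj]
          rw [hrepl, hsetgen, List.map_append,
              List.append_assoc, List.map_singleton, List.singleton_append, ← hgd]
      · rw [if_neg hd, hget c', hlen1, hlen2]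
        simp only [Bool.not_eq_true] at hd
        have hany : ((pref ++ [d]).any (fun dic => (PySem.Dict.mk dic).contains c'))
            = (pref.any fun dic => (PySem.Dict.mk dic).contains c') := by
          rw [List.any_append, List.any_cons, List.any_nil, hd, Bool.or_false, Bool.or_false]
        rw [hany]
        by_cases hP : (pref.any fun dic => (PySem.Dict.mk dic).contains c') = true
        · have hg0 : pvG d c' = 0 := by unfold pvG; rw [hd]; simp
          rw [if_pos hP, if_pos hP, List.replicate_succ, List.map_append,
              List.append_assoc, List.map_singleton, List.singleton_append, hg0]
        · rw [if_neg hP, if_neg hP]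

theorem pvB_keys (n : Nat) :
    ∀ (suff : List (List (String × List Int))) (s : Int) (cc : PySem.Dict String (List Int)),
    ((PySem.List.enumerate suff s).foldl
        (fun cc p => p.2.foldl (fun cc kv => cc.insert kv.1
          (PySem.List.pySetD (if cc.contains kv.1 then cc.getD kv.1 [] else List.replicate n 0) p.1 (kv.2.headD 0))) cc) cc).keys
      = suff.foldl (fun ks d => PySem.Set.update ks (d.map (·.1))) cc.keys := by
  intro suff
  induction suff with
  | nil => intro s cc; rw [PySem.List.enumerate_nil]; rfl
  | cons d suff ih =>
    intro s cc
    rw [PySem.List.enumerate_cons, List.foldl_cons, List.foldl_cons, ih]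
    congr 1
    exact PySem.Dict.keys_foldl_insert_key d (fun kv => kv.1)
      (fun cc kv => PySem.List.pySetD (if cc.contains kv.1 then cc.getD kv.1 [] else List.replicate n 0) s (kv.2.headD 0)) cc

theorem pvSet_chain : ∀ (ls : List (List String)) (s : List String),
    ls.foldl (fun ks l => PySem.Set.update ks l) s = PySem.Set.update s ls.flatten := by
  intro ls
  induction ls with
  | nil => intro s; rfl
  | cons a ls ih =>
    intro s
    rw [List.foldl_cons, ih, List.flatten_cons]
    show _ = List.foldl PySem.Set.add s (a ++ ls.flatten)
    rw [List.foldl_append]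
    rfl

theorem pvBbody_eq (L : Nat) :
    (fun (cc : PySem.Dict String (List Int)) (p : Int × List (String × List Int)) =>
      p.2.foldl (fun cc kv =>
        let cc' := if cc.contains kv.1 then cc else cc.insert kv.1 (List.replicate L (0 : Int))
        cc'.insert kv.1 (PySem.List.pySetD (cc'.getD kv.1 []) p.1 (kv.2.headD 0))) cc)
    = (fun cc p => p.2.foldl (fun cc kv => cc.insert kv.1
        (PySem.List.pySetD (if cc.contains kv.1 then cc.getD kv.1 [] else List.replicate L 0) p.1 (kv.2.headD 0))) cc) := by
  funext cc p
  have : (fun (cc : PySem.Dict String (List Int)) (kv : String × List Int) =>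
        let cc' := if cc.contains kv.1 then cc else cc.insert kv.1 (List.replicate L (0 : Int))
        cc'.insert kv.1 (PySem.List.pySetD (cc'.getD kv.1 []) p.1 (kv.2.headD 0)))
      = (fun cc kv => cc.insert kv.1
        (PySem.List.pySetD (if cc.contains kv.1 then cc.getD kv.1 [] else List.replicate L 0) p.1 (kv.2.headD 0))) := by
    funext cc kv
    exact pvB_body L p.1 cc kv
  rw [this]

theorem pvAbody_eq (c : String) :
    (fun (cc : PySem.Dict String (List Int)) (dic : List (String × List Int)) =>
      if (PySem.Dict.mk dic).contains c then
        cc.insert c (cc.getD c [] ++ [((PySem.Dict.mk dic).getD c []).headD 0])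
      else
        cc.insert c (cc.getD c [] ++ [(0 : Int)]))
    = (fun cc dic => cc.insert c (cc.getD c [] ++ [pvG dic c])) := by
  funext cc dic
  exact pvA_body cc dic c

theorem pv_contains_of_mem (l : List (List (String × List Int))) (c : String)
    (h : c ∈ (l.map (fun dic => dic.map (·.1))).flatten) :
    l.any (fun dic => (PySem.Dict.mk dic).contains c) = true := by
  rw [List.mem_flatten] at h
  obtain ⟨ks, hks, hc⟩ := h
  rw [List.mem_map] at hks
  obtain ⟨dic, hdic, rfl⟩ := hks
  rw [List.mem_map] at hc
  obtain ⟨p, hp, rfl⟩ := hc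
  refine List.any_eq_true.mpr ⟨dic, hdic, ?_⟩
  rw [PySem.Dict.contains_mk]
  exact List.any_eq_true.mpr ⟨p, hp, by simp⟩

theorem pv_main (l : List (List (String × List Int)))
    (hpre : ∀ dic ∈ l, (dic.map (·.1)).Nodup ∧ ∀ kv ∈ dic, kv.2 ≠ []) :
    summarize_circstar_outs l = summarize_circstar_outs_alt l := by
  have hnd : ∀ dic ∈ l, (dic.map (·.1)).Nodup := fun dic hd => (hpre dic hd).1
  -- B's dict, with the inner body collapsed to a single insert
  have hBitems : (summarize_circstar_outs_alt l) =
      ((PySem.List.enumerate l 0).foldl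
        (fun cc p => p.2.foldl (fun cc kv => cc.insert kv.1
          (PySem.List.pySetD (if cc.contains kv.1 then cc.getD kv.1 [] else List.replicate l.length 0) p.1 (kv.2.headD 0))) cc)
        PySem.Dict.empty).items := by
    show ((PySem.List.enumerate l 0).foldl _ PySem.Dict.empty).items = _
    rw [pvBbody_eq l.length]
  set Bd := ((PySem.List.enumerate l 0).foldl
        (fun cc p => p.2.foldl (fun cc kv => cc.insert kv.1
          (PySem.List.pySetD (if cc.contains kv.1 then cc.getD kv.1 [] else List.replicate l.length 0) p.1 (kv.2.headD 0))) cc)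
        PySem.Dict.empty) with hBd
  have hkeys : Bd.keys = PySem.Set.ofList ((l.map (fun dic => dic.map (·.1))).flatten) := by
    rw [hBd]
    have h := pvB_keys l.length l ((0 : Nat) : Int) PySem.Dict.empty
    simp only [Nat.cast_zero] at h
    rw [h]
    rw [← List.foldl_map (f := fun (dic : List (String × List Int)) => dic.map (·.1))
      (g := fun ks le => PySem.Set.update ks le), pvSet_chain]
    show PySem.Set.update [] _ = _
    rw [PySem.Set.update_nil_left]
  have hout := pvB_outer l hnd l [] rfl PySem.Dict.empty
    (by intro c; simp [PySem.Dict.contains_empty])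
    (by intro c; simp [PySem.Dict.getD_empty])
  simp only [List.length_nil, Nat.cast_zero] at hout
  cases l with
  | nil => rfl
  | cons d0 lst =>
    have hA : summarize_circstar_outs (d0 :: lst)
        = (PySem.Set.ofList (((d0 :: lst).map (fun dic => dic.map (·.1))).flatten)).map
            (fun c => (c, pvRow (d0 :: lst) c)) := by
      show ((PySem.Set.ofList (((d0 :: lst).map (fun dic => (PySem.Dict.mk dic).keys)).flatMap id)).foldl
        (fun cc circid => (d0 :: lst).foldl _ cc) PySem.Dict.empty).items = _
      have hS : (((d0 :: lst).map (fun dic => (PySem.Dict.mk dic).keys)).flatMap id)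
          = ((d0 :: lst).map (fun dic => dic.map (·.1))).flatten := by
        rw [List.flatMap_id]
        simp only [PySem.Dict.keys_mk]
      rw [hS]
      have hfun : (fun (cc : PySem.Dict String (List Int)) (circid : String) =>
          (d0 :: lst).foldl (fun cc dic =>
            if (PySem.Dict.mk dic).contains circid then
              cc.insert circid (cc.getD circid [] ++ [((PySem.Dict.mk dic).getD circid []).headD 0])
            else
              cc.insert circid (cc.getD circid [] ++ [(0 : Int)])) cc)
          = (fun cc circid => (d0 :: lst).foldl
              (fun cc dic => cc.insert circid (cc.getD circid [] ++ [pvG dic circid])) cc) := by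
        funext cc circid
        rw [pvAbody_eq circid]
      rw [hfun]
      rw [pvA_outer d0 lst _ PySem.Dict.empty (PySem.Set.nodup_ofList _)
        (fun c _ => PySem.Dict.contains_empty c)]
      rfl
    rw [hA, hBitems]
    rw [PySem.Dict.items_eq_map_keys Bd (hkeys ▸ PySem.Set.nodup_ofList _) []]
    rw [hkeys]
    apply List.map_congr_left
    intro c hc
    rw [PySem.Set.mem_ofList] at hc
    obtain ⟨_, hg⟩ := hout c
    rw [hg, if_pos (pv_contains_of_mem _ c hc)]

-- ===== VERDICT (by name: the statement is the Claim_ definition above) =====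
theorem summarize_circstar_outs_spec : Claim_equal_summarize_circstar_outs := by
  intro cirdic_list _ hpre
  exact pv_main cirdic_list hpre
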